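-- pv_equiv track=rewrite | github.com/WenfeiY/Procodon | 12-Genome_encoding_space/01-Computing_encoding_space_from_GFF3.py | rm_rest_incomplete_codons
-- ===== SOURCE A (Python) =====
-- def in_range(
--     single_interval,
--     intervals
-- ):
--     """
--     Determines whether a given single interval overlaps with a series of intervals.
--
--     Parameters:
--         single_interval: provided single inverval, list
--             e.g. [100, 200]
--         intervals: provided intervals, list
--             e.g. [[50, 150], [250, 350], ...]
--
--     Return:
--         iv: overlaped interval from series of intervals
--             if no overlap, return False
--     """
--     for iv in intervals:
--         if single_interval[0] >= iv[0] and single_interval[1] <= iv[1]: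
--             return iv
--     return False
--
-- def cut_incomplete_codon(
--     cds_range: list,
--     containing_range: list,
--     phase: int,
--     strand: str
-- ):
--     """
--     Remove incomplete codons from final CDS region
--
--     Parameters:
--         cds_range: list contsining start and end positions of CDS
--         containing_range: list contsining start and end positions of incomplete codon
--         phase: "actural phase" of CDS in integer (0, 1 or 2)
--         strand: sequence strand ('+' or '-'), str
--
--     Return:
--         complete CDS region: CDS region removed incomplete codons, list
--     """
--     if strand == '+':
--         phase_0_start = cds_range[0] + (phase + containing_range[0] - cds_range[0]) % 3
--         phase_0_end = cds_range[1] - (cds_range[1] - phase_0_start) % 3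
--     else:
--         phase_0_end = cds_range[1] - (phase + cds_range[1] - containing_range[1]) % 3
--         phase_0_start = cds_range[0] + (phase_0_end - cds_range[0]) % 3
--     if phase_0_end > phase_0_start:
--         return [phase_0_start, phase_0_end]
--     else:
--         return []
--
-- def rm_rest_incomplete_codons(
--     avail_cds_ranges: list,
--     merged_phase_dict: dict,
--     strand: str
-- ):
--     """
--     Remove the rest incomplete codons in the available CDS regions
--
--     Parameters:
--         avail_cds_ranges: list contsining available CDS ranges
--         merged_phase_dict: CDS ranges (interval union) with CDS phase as keys
--         strand: sequence strand ('+' or '-'), str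
--
--     Return:
--         cut_avail_cds_ranges: final available CDS ranges, list
--     """
--     cut_avail_cds_ranges = []
--     for cds_range in avail_cds_ranges:
--         for phase in merged_phase_dict:
--             containing_range = in_range(cds_range, merged_phase_dict[phase])
--             if containing_range:
--                 cut_cds_range = cut_incomplete_codon(cds_range, containing_range, phase, strand)
--                 if cut_cds_range:
--                     cut_avail_cds_ranges.append(cut_cds_range)
--     return cut_avail_cds_ranges
-- ===== SOURCE B (Python) =====
-- def rm_rest_incomplete_codons(
--     avail_cds_ranges: list,
--     merged_phase_dict: dict,
--     strand: str
-- ):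
--     """
--     Remove the rest incomplete codons in the available CDS regions.
--
--     Interval-major two-stage algorithm: stage 1 builds, per phase, a match
--     table by iterating the INTERVALS and letting each interval claim every
--     still-unclaimed range it contains (recording the codon-frame residue of
--     its start, or end on '-'); stage 2 walks the ranges once and emits the
--     trimmed range by floor-division codon counting from the recorded residue.
--     """
--     plus = strand == '+'
--     items = list(enumerate(avail_cds_ranges))
--     columns = []
--     for phase, intervals in merged_phase_dict.items():
--         matched = {}
--         pending = items
--         for iv in intervals:
--             lo, hi = iv[0], iv[1]
--             res = (phase + (lo if plus else -hi)) % 3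
--             still = []
--             for i, r in pending:
--                 if lo <= r[0] and r[1] <= hi:
--                     matched[i] = res
--                 else:
--                     still.append((i, r))
--             pending = still
--         columns.append(matched)
--     out = []
--     for i, r in items:
--         for col in columns:
--             if i in col:
--                 res = col[i]
--                 a, b = r[0], r[1]
--                 if plus:
--                     s = a + (res - a) % 3
--                     n = (b - s) // 3
--                     if n > 0:
--                         out.append([s, s + 3 * n])
--                 else:
--                     e = b - (b + res) % 3
--                     n = (e - a) // 3
--                     if n > 0:
--                         out.append([e - 3 * n, e])
--     return out
-- ===== Notes on version B (the rewrite author's own statement) =====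
-- stated objective: alternative
-- what changed: A's range-major pipeline (for each range and phase, a linear in_range scan returning interval-or-False, then cut_incomplete_codon's two modulo subtractions) is replaced by an interval-major two-stage algorithm: stage 1 iterates each phase's INTERVALS, letting every interval claim the still-unclaimed ranges it contains into a per-phase match table of codon-frame residues (a shrinking pending list realises first-match), stage 2 walks the ranges once emitting trimmed ranges by floor-division codon counting from the table.
-- outside the precondition, e.g. on rm_rest_incomplete_codons([[0, 0]], {0: [[0, 5], [1]]}, '+'): A returns [], B raises IndexError
import Mathlib
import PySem

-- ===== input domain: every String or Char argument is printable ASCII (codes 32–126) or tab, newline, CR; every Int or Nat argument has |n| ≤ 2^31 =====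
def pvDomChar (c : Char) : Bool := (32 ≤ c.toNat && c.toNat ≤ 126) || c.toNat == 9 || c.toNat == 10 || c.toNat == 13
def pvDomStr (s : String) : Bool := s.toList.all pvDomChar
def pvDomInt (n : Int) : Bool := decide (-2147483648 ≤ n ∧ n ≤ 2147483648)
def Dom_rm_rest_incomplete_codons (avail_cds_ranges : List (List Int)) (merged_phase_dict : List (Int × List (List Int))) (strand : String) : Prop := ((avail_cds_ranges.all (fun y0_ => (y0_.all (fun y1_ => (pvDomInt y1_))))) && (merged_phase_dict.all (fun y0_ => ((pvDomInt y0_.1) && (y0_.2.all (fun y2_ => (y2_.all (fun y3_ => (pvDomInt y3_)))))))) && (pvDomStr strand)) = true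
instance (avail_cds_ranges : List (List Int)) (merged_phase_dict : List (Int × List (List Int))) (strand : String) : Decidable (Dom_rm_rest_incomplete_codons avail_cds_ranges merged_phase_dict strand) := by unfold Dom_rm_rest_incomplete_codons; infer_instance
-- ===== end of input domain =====

-- B replaces A's range-major pipeline (per range and phase, a linear in_range scan plus
-- cut_incomplete_codon's double modulo trim) by an interval-major two-stage algorithm:
-- stage 1 lets each interval of each phase claim the still-unclaimed ranges it contains into a
-- per-phase match table of codon-frame residues (a shrinking pending list realises first-match),
-- stage 2 walks the ranges once, emitting trimmed ranges by floor-division codon counting.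
-- Same asymptotics (objective: alternative).

-- ===== PORT A =====
-- Returns `some iv` for Python's `return iv`, `none` for `return False`; the wildcard
-- arms are Python's IndexError on a row shorter than 2 (excluded by Pre_).
def in_range (single_interval : List Int) (intervals : List (List Int)) : Option (List Int) :=
  match intervals with
  | [] => none
  | iv :: rest =>
    match PySem.List.pyGet? single_interval 0, PySem.List.pyGet? iv 0 with
    | some s0, some i0 =>
      if s0 ≥ i0 then
        match PySem.List.pyGet? single_interval 1, PySem.List.pyGet? iv 1 with
        | some s1, some i1 =>
          if s1 ≤ i1 then some iv else in_range single_interval rest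
        | _, _ => none
      else in_range single_interval rest
    | _, _ => none

-- The wildcard arm is Python's IndexError on a row shorter than 2 (excluded by Pre_).
def cut_incomplete_codon (cds_range : List Int) (containing_range : List Int) (phase : Int) (strand : String) : List Int :=
  match PySem.List.pyGet? cds_range 0, PySem.List.pyGet? cds_range 1,
        PySem.List.pyGet? containing_range 0, PySem.List.pyGet? containing_range 1 with
  | some r0, some r1, some c0, some c1 =>
    if strand == "+" then
      let phase_0_start := r0 + PySem.Int.mod (phase + c0 - r0) 3
      let phase_0_end := r1 - PySem.Int.mod (r1 - phase_0_start) 3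
      if phase_0_end > phase_0_start then [phase_0_start, phase_0_end] else []
    else
      let phase_0_end := r1 - PySem.Int.mod (phase + r1 - c1) 3
      let phase_0_start := r0 + PySem.Int.mod (phase_0_end - r0) 3
      if phase_0_end > phase_0_start then [phase_0_start, phase_0_end] else []
  | _, _, _, _ => []

def rm_rest_incomplete_codons (avail_cds_ranges : List (List Int)) (merged_phase_dict : List (Int × List (List Int))) (strand : String) : List (List Int) :=
  let d := PySem.Dict.ofList merged_phase_dict
  avail_cds_ranges.foldl (fun acc cds_range =>
    (PySem.Dict.keys d).foldl (fun acc phase =>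
      match in_range cds_range (PySem.Dict.getD d phase []) with
      | none => acc                                  -- in_range returned False
      | some containing_range =>
        if containing_range.isEmpty then acc         -- `if containing_range:` truthiness
        else
          let cut_cds_range := cut_incomplete_codon cds_range containing_range phase strand
          if cut_cds_range.isEmpty then acc else acc ++ [cut_cds_range]) acc) []

-- ===== PORT B =====
-- codon-frame residue recorded for a claimed range: frame of the interval start ('+') / end ('-')
def pvResidue (plus : Bool) (phase lo hi : Int) : Int :=
  PySem.Int.mod (phase + (if plus then lo else -hi)) 3

-- inner loop of stage 1 (`for i, r in pending:`): the interval [lo, hi] claims each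
-- contained pending range into the matched table, the rest stay pending.  The `st2`
-- fall-through arms are Python's IndexError on a row shorter than 2 (excluded by Pre_).
def pvClaimStep (lo hi res : Int) (st2 : PySem.Dict Int Int × List (Int × List Int)) (ir : Int × List Int) : PySem.Dict Int Int × List (Int × List Int) :=
  match PySem.List.pyGet? ir.2 0 with
  | some a =>
    if lo ≤ a then
      match PySem.List.pyGet? ir.2 1 with
      | some b => if b ≤ hi then (st2.1.insert ir.1 res, st2.2) else (st2.1, st2.2 ++ [ir])
      | none => st2
    else (st2.1, st2.2 ++ [ir])
  | none => st2

def pvClaimF (lo hi res : Int) (pending : List (Int × List Int)) (m : PySem.Dict Int Int) : PySem.Dict Int Int × List (Int × List Int) :=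
  pending.foldl (pvClaimStep lo hi res) (m, [])

-- one interval of stage 1 (`for iv in intervals:`); the `_, _ => st` arm is
-- Python's IndexError on an interval shorter than 2 (excluded by Pre_)
def pvFillStep (plus : Bool) (phase : Int) (st : PySem.Dict Int Int × List (Int × List Int)) (iv : List Int) : PySem.Dict Int Int × List (Int × List Int) :=
  match PySem.List.pyGet? iv 0, PySem.List.pyGet? iv 1 with
  | some lo, some hi => pvClaimF lo hi (pvResidue plus phase lo hi) st.2 st.1
  | _, _ => st

def pvFillGo (plus : Bool) (phase : Int) (intervals : List (List Int)) (st : PySem.Dict Int Int × List (Int × List Int)) : PySem.Dict Int Int × List (Int × List Int) :=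
  intervals.foldl (pvFillStep plus phase) st

-- stage 1 for one phase: the match table (range index ↦ codon-frame residue)
def pvFill (plus : Bool) (phase : Int) (intervals : List (List Int)) (items : List (Int × List Int)) : PySem.Dict Int Int :=
  (pvFillGo plus phase intervals (PySem.Dict.empty, items)).1

def rm_rest_incomplete_codons_alt (avail_cds_ranges : List (List Int)) (merged_phase_dict : List (Int × List (List Int))) (strand : String) : List (List Int) :=
  let plus := strand == "+"
  let items := PySem.List.enumerate avail_cds_ranges 0
  -- one match table per phase, filled interval-major
  let columns := (PySem.Dict.ofList merged_phase_dict).items.map (fun pr => pvFill plus pr.1 pr.2 items)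
  -- stage 2: range-major emission by codon counting
  items.foldl (fun out ir =>
    columns.foldl (fun out col =>
      match col.get? ir.1 with
      | none => out
      | some res =>
        match PySem.List.pyGet? ir.2 0, PySem.List.pyGet? ir.2 1 with
        | some a, some b =>
          if plus then
            let s := a + PySem.Int.mod (res - a) 3
            let n := PySem.Int.floordiv (b - s) 3
            if n > 0 then out ++ [[s, s + 3 * n]] else out
          else
            let e := b - PySem.Int.mod (b + res) 3
            let n := PySem.Int.floordiv (e - a) 3
            if n > 0 then out ++ [[e - 3 * n, e]] else out
        | _, _ => out) out) []  -- unreachable: a matched range was indexed in stage 1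

-- ===== PRECONDITION & SPEC =====
-- Pre_ restricts to well-formed inputs (every interval of the phase dict — after duplicate
-- keys resolve, last value wins — has at least 2 elements, and, unless all phase interval
-- lists are empty, every CDS range too; the function's natural domain): on malformed rows
-- Python A raises IndexError, or returns only because a short row happens never to be
-- indexed, while B's interval-major pass would raise there.  (A CDS range of length 1 whose
-- start lies left of every interval start is admitted: neither program ever indexes it twice.)
def Pre_rm_rest_incomplete_codons (avail_cds_ranges : List (List Int)) (merged_phase_dict : List (Int × List (List Int))) (strand : String) : Prop :=
  (∀ ivs ∈ (PySem.Dict.ofList merged_phase_dict).values, ∀ iv ∈ ivs, 2 ≤ iv.length) ∧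
  ((∀ ivs ∈ (PySem.Dict.ofList merged_phase_dict).values, ivs = []) ∨
    (∀ r ∈ avail_cds_ranges, 2 ≤ r.length ∨
      (r.length = 1 ∧ ∀ ivs ∈ (PySem.Dict.ofList merged_phase_dict).values, ∀ iv ∈ ivs, r.headI < iv.headI)))
instance (avail_cds_ranges : List (List Int)) (merged_phase_dict : List (Int × List (List Int))) (strand : String) : Decidable (Pre_rm_rest_incomplete_codons avail_cds_ranges merged_phase_dict strand) := by unfold Pre_rm_rest_incomplete_codons; infer_instance

def pvWitness_rm_rest_incomplete_codons : List (List Int) × (List (Int × List (List Int))) × String :=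
  ([[1, 9]], [(0, [[0, 10]])], "+")

def Spec_rm_rest_incomplete_codons (avail_cds_ranges : List (List Int)) (merged_phase_dict : List (Int × List (List Int))) (strand : String) (out : List (List Int)) : Prop := out = rm_rest_incomplete_codons_alt avail_cds_ranges merged_phase_dict strand
instance (avail_cds_ranges : List (List Int)) (merged_phase_dict : List (Int × List (List Int))) (strand : String) (out : List (List Int)) : Decidable (Spec_rm_rest_incomplete_codons avail_cds_ranges merged_phase_dict strand out) := by unfold Spec_rm_rest_incomplete_codons; infer_instance

-- ===== CLAIM (what is proved, stated in full; the proofs are below) =====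
def Claim_equal_rm_rest_incomplete_codons : Prop := ∀ (avail_cds_ranges : List (List Int)) (merged_phase_dict : List (Int × List (List Int))) (strand : String), Dom_rm_rest_incomplete_codons avail_cds_ranges merged_phase_dict strand → Pre_rm_rest_incomplete_codons avail_cds_ranges merged_phase_dict strand → Spec_rm_rest_incomplete_codons avail_cds_ranges merged_phase_dict strand (rm_rest_incomplete_codons avail_cds_ranges merged_phase_dict strand)

-- ===== LEMMAS AND PROOFS =====

theorem pv_in_range_mem (s : List Int) (ivs : List (List Int)) (iv : List Int)
    (h : in_range s ivs = some iv) : iv ∈ ivs := by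
  induction ivs with
  | nil => simp [in_range] at h
  | cons x rest ih =>
    rw [in_range] at h
    rcases hx0 : PySem.List.pyGet? s 0 with _ | s0 <;> rcases hx1 : PySem.List.pyGet? x 0 with _ | i0 <;>
      simp [hx0, hx1] at h
    split_ifs at h with h1
    · rcases hy0 : PySem.List.pyGet? s 1 with _ | s1 <;> rcases hy1 : PySem.List.pyGet? x 1 with _ | i1 <;>
        simp [hy0, hy1] at h
      split_ifs at h with h2
      · cases h; exact List.mem_cons_self ..
      · exact List.mem_cons_of_mem _ (ih h)
    · exact List.mem_cons_of_mem _ (ih h)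

-- a length-1 range starting left of every interval start is never matched by A's scan
theorem pv_in_range_len1 (a : Int) (ivs : List (List Int)) (h : ∀ iv ∈ ivs, 2 ≤ iv.length)
    (hlt : ∀ iv ∈ ivs, a < iv.headI) : in_range [a] ivs = none := by
  induction ivs with
  | nil => simp [in_range]
  | cons iv rest ih =>
    obtain ⟨i0, i1, u, rfl⟩ : ∃ i0 i1 u, iv = i0 :: i1 :: u := by
      have h2 := h iv (List.mem_cons_self ..)
      match iv, h2 with
      | i0 :: i1 :: u, _ => exact ⟨i0, i1, u, rfl⟩
    have ha : a < i0 := by simpa using hlt _ (List.mem_cons_self ..)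
    rw [in_range]
    have h0 : PySem.List.pyGet? [a] (0 : Int) = some a := by simp [pysem]
    have g0 : PySem.List.pyGet? (i0 :: i1 :: u) (0 : Int) = some i0 := by simp [pysem]
    rw [h0, g0]
    dsimp only
    rw [if_neg (by omega : ¬ a ≥ i0)]
    exact ih (fun iv hiv => h iv (List.mem_cons_of_mem _ hiv))
      (fun iv hiv => hlt iv (List.mem_cons_of_mem _ hiv))

-- containment test on a range row, as the inner claims loop evaluates it
def pvContains (lo hi : Int) (r : List Int) : Bool :=
  match PySem.List.pyGet? r 0, PySem.List.pyGet? r 1 with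
  | some a, some b => lo ≤ a && b ≤ hi
  | _, _ => false

-- residue recorded for a containing interval (intervals have length ≥ 2 under Pre_)
def pvResOf (plus : Bool) (phase : Int) (iv : List Int) : Int :=
  pvResidue plus phase iv.headI iv.tail.headI

-- a pending row is indexable exactly as far as the loops look at it
def pvRowWf (ivs : List (List Int)) (r : List Int) : Prop :=
  2 ≤ r.length ∨ (r.length = 1 ∧ ∀ iv ∈ ivs, r.headI < iv.headI)

-- in a list of pairs with nodup keys, the key determines the row
theorem pv_key_unique (l : List (Int × List Int)) (h : (l.map Prod.fst).Nodup)
    (i : Int) (r r' : List Int) (h1 : (i, r) ∈ l) (h2 : (i, r') ∈ l) : r = r' := by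
  induction l with
  | nil => cases h1
  | cons x t ih =>
    rw [List.map_cons, List.nodup_cons] at h
    rcases List.mem_cons.1 h1 with e1 | m1 <;> rcases List.mem_cons.1 h2 with e2 | m2
    · exact congrArg Prod.snd (e1.trans e2.symm)
    · exact absurd (List.mem_map_of_mem (f := Prod.fst) m2)
        (by rw [show x.1 = i from (congrArg Prod.fst e1).symm] at h; exact h.1)
    · exact absurd (List.mem_map_of_mem (f := Prod.fst) m1)
        (by rw [show x.1 = i from (congrArg Prod.fst e2).symm] at h; exact h.1)
    · exact ih h.2 m1 m2

-- one interval's claiming pass: the new pending list is the filter of the old one, and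
-- the matched table gains exactly the contained rows (all with the same residue)
theorem pv_claim_go (lo hi res : Int) :
    ∀ (pending : List (Int × List Int)),
    (∀ ir ∈ pending, ∃ a, PySem.List.pyGet? ir.2 0 = some a ∧
      (lo ≤ a → ∃ b, PySem.List.pyGet? ir.2 1 = some b)) →
    ∀ (m : PySem.Dict Int Int) (s : List (Int × List Int)),
    (pending.foldl (pvClaimStep lo hi res) (m, s)).2
        = s ++ pending.filter (fun ir => !pvContains lo hi ir.2) ∧
    (∀ i r, (i, r) ∈ pending → pvContains lo hi r = true →
      (pending.foldl (pvClaimStep lo hi res) (m, s)).1.get? i = some res) ∧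
    (∀ i, (¬ ∃ r, (i, r) ∈ pending ∧ pvContains lo hi r = true) →
      (pending.foldl (pvClaimStep lo hi res) (m, s)).1.get? i = m.get? i) := by
  intro pending
  induction pending with
  | nil =>
    intro _ m s
    exact ⟨by simp, fun i r h => absurd h (List.not_mem_nil), fun i _ => rfl⟩
  | cons ir rest ih =>
    intro hwf m s
    obtain ⟨a, ha, hb⟩ := hwf ir (List.mem_cons_self ..)
    have hrest := fun x hx => hwf x (List.mem_cons_of_mem _ hx)
    simp only [List.foldl_cons]
    by_cases hla : lo ≤ a
    · obtain ⟨b, hbs⟩ := hb hla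
      by_cases hbh : b ≤ hi
      · have hstep : pvClaimStep lo hi res (m, s) ir = (m.insert ir.1 res, s) := by
          simp [pvClaimStep, ha, hbs, hla, hbh]
        have hc : pvContains lo hi ir.2 = true := by simp [pvContains, ha, hbs, hla, hbh]
        rw [hstep]
        obtain ⟨h1, h2, h3⟩ := ih hrest (m.insert ir.1 res) s
        refine ⟨by rw [h1]; simp [hc], fun i r hmem hcr => ?_, fun i hne => ?_⟩
        · rcases List.mem_cons.1 hmem with he | hm
          · have hi1 : i = ir.1 := (congrArg Prod.fst he)
            by_cases hex : ∃ rr, (i, rr) ∈ rest ∧ pvContains lo hi rr = true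
            · obtain ⟨rr, hrr, hcc⟩ := hex
              exact h2 i rr hrr hcc
            · rw [h3 i hex, hi1, PySem.Dict.get?_insert_self]
          · exact h2 i r hm hcr
        · have hne2 : ¬ ∃ rr, (i, rr) ∈ rest ∧ pvContains lo hi rr = true :=
            fun hex => hex.elim fun rr hrr => hne ⟨rr, List.mem_cons_of_mem _ hrr.1, hrr.2⟩
          rw [h3 i hne2]
          have hine : i ≠ ir.1 := fun he =>
            hne ⟨ir.2, by rw [he]; exact List.mem_cons_self .., hc⟩
          exact PySem.Dict.get?_insert_of_ne _ _ hine
      · have hstep : pvClaimStep lo hi res (m, s) ir = (m, s ++ [ir]) := by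
          simp [pvClaimStep, ha, hbs, hla, hbh]
        have hc : pvContains lo hi ir.2 = false := by simp [pvContains, ha, hbs, hbh]
        rw [hstep]
        obtain ⟨h1, h2, h3⟩ := ih hrest m (s ++ [ir])
        refine ⟨by rw [h1]; simp [hc], fun i r hmem hcr => ?_, fun i hne => ?_⟩
        · rcases List.mem_cons.1 hmem with he | hm
          · rw [show r = ir.2 from congrArg Prod.snd he, hc] at hcr; cases hcr
          · exact h2 i r hm hcr
        · exact h3 i (fun hex => hex.elim fun rr hrr =>
            hne ⟨rr, List.mem_cons_of_mem _ hrr.1, hrr.2⟩)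
    · have hstep : pvClaimStep lo hi res (m, s) ir = (m, s ++ [ir]) := by
        simp [pvClaimStep, ha, hla]
      have hc : pvContains lo hi ir.2 = false := by
        rcases h1 : PySem.List.pyGet? ir.2 1 with _ | b <;> simp [pvContains, ha, h1, hla]
      rw [hstep]
      obtain ⟨h1, h2, h3⟩ := ih hrest m (s ++ [ir])
      refine ⟨by rw [h1]; simp [hc], fun i r hmem hcr => ?_, fun i hne => ?_⟩
      · rcases List.mem_cons.1 hmem with he | hm
        · rw [show r = ir.2 from congrArg Prod.snd he, hc] at hcr; cases hcr
        · exact h2 i r hm hcr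
      · exact h3 i (fun hex => hex.elim fun rr hrr =>
          hne ⟨rr, List.mem_cons_of_mem _ hrr.1, hrr.2⟩)

-- stage 1 computes, for each pending range, exactly A's first containing interval's residue
theorem pv_fill_go (plus : Bool) (phase : Int) (ivs : List (List Int))
    (hivs : ∀ iv ∈ ivs, 2 ≤ iv.length) :
    ∀ (m : PySem.Dict Int Int) (pending : List (Int × List Int)),
    (pending.map Prod.fst).Nodup →
    (∀ ir ∈ pending, pvRowWf ivs ir.2) →
    (∀ i r, (i, r) ∈ pending →
      (pvFillGo plus phase ivs (m, pending)).1.get? i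
        = ((in_range r ivs).map (pvResOf plus phase)).or (m.get? i)) ∧
    (∀ i, i ∉ pending.map Prod.fst →
      (pvFillGo plus phase ivs (m, pending)).1.get? i = m.get? i) := by
  induction ivs with
  | nil =>
    intro m pending _ _
    exact ⟨fun i r _ => by simp [pvFillGo, in_range], fun i _ => rfl⟩
  | cons iv rest ih =>
    intro m pending hnd hwf
    obtain ⟨lo, hi, u, rfl⟩ : ∃ lo hi u, iv = lo :: hi :: u := by
      have h2 := hivs iv (List.mem_cons_self ..)
      match iv, h2 with
      | lo :: hi :: u, _ => exact ⟨lo, hi, u, rfl⟩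
    have g0 : PySem.List.pyGet? (lo :: hi :: u) (0 : Int) = some lo := by simp [pysem]
    have g1 : PySem.List.pyGet? (lo :: hi :: u) (1 : Int) = some hi := by simp [pysem]
    have hrest : ∀ iv ∈ rest, 2 ≤ iv.length := fun x hx => hivs x (List.mem_cons_of_mem _ hx)
    have hwfin : ∀ ir ∈ pending, ∃ a, PySem.List.pyGet? ir.2 0 = some a ∧
        (lo ≤ a → ∃ b, PySem.List.pyGet? ir.2 1 = some b) := by
      intro ir hir
      rcases hwf ir hir with h2 | ⟨h1, hlt⟩
      · obtain ⟨a, b, t, he⟩ : ∃ a b t, ir.2 = a :: b :: t := by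
          match ir.2, h2 with
          | a :: b :: t, _ => exact ⟨a, b, t, rfl⟩
        exact ⟨a, by simp [he, pysem], fun _ => ⟨b, by simp [he, pysem]⟩⟩
      · obtain ⟨a, he⟩ : ∃ a, ir.2 = [a] := by
          match ir.2, h1 with
          | [a], _ => exact ⟨a, rfl⟩
        have ha : a < lo := by
          have := hlt (lo :: hi :: u) (List.mem_cons_self ..)
          simpa [he] using this
        exact ⟨a, by simp [he, pysem], fun h => absurd h (by omega)⟩
    have hstep : pvFillGo plus phase ((lo :: hi :: u) :: rest) (m, pending)
        = pvFillGo plus phase rest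
            (pvClaimF lo hi (pvResidue plus phase lo hi) pending m) := by
      simp only [pvFillGo, List.foldl_cons]
      congr 1
      simp [pvFillStep, g0]
    set res := pvResidue plus phase lo hi with hres
    obtain ⟨hsnd, hFpos, hFneg⟩ := pv_claim_go lo hi res pending hwfin m []
    have hFsnd : (pvClaimF lo hi res pending m).2
        = pending.filter (fun ir => !pvContains lo hi ir.2) := by
      rw [pvClaimF, hsnd]; simp
    set pending' := pending.filter (fun ir => !pvContains lo hi ir.2) with hp'
    have hFeq : pvClaimF lo hi res pending m = ((pvClaimF lo hi res pending m).1, pending') := by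
      rw [← hFsnd]
    have hnd' : (pending'.map Prod.fst).Nodup :=
      List.Nodup.sublist (List.Sublist.map _ List.filter_sublist) hnd
    have hwf' : ∀ ir ∈ pending', pvRowWf rest ir.2 := by
      intro ir hir
      rcases hwf ir (List.mem_of_mem_filter hir) with h2 | ⟨h1, hlt⟩
      · exact Or.inl h2
      · exact Or.inr ⟨h1, fun x hx => hlt x (List.mem_cons_of_mem _ hx)⟩
    obtain ⟨ihA, ihB⟩ := ih hrest (pvClaimF lo hi res pending m).1 pending' hnd' hwf'
    rw [hstep, hFeq]
    constructor
    · intro i r hir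
      by_cases hc : pvContains lo hi r = true
      · -- claimed now: r has length ≥ 2 and this interval contains it; A's scan stops here too
        obtain ⟨a, b, ha, hb⟩ : ∃ a b, PySem.List.pyGet? r 0 = some a ∧
            PySem.List.pyGet? r 1 = some b := by
          unfold pvContains at hc
          rcases h0 : PySem.List.pyGet? r 0 with _ | a <;> rcases h1 : PySem.List.pyGet? r 1 with _ | b <;>
            rw [h0, h1] at hc <;> simp at hc
          exact ⟨a, b, rfl, rfl⟩
        have hcv : lo ≤ a ∧ b ≤ hi := by
          unfold pvContains at hc; rw [ha, hb] at hc; simpa using hc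
        have hir_eq : in_range r ((lo :: hi :: u) :: rest) = some (lo :: hi :: u) := by
          simp [in_range, ha, hb, g0, show a ≥ lo from hcv.1, hcv.2]
        rw [hir_eq]
        have hnotin : i ∉ pending'.map Prod.fst := by
          intro hmem
          obtain ⟨ir', hir', hfst⟩ := List.mem_map.1 hmem
          have hnc : pvContains lo hi ir'.2 = false := by
            have := List.of_mem_filter hir'
            simpa using this
          have hmem' : (i, ir'.2) ∈ pending := by
            have hmf := List.mem_of_mem_filter hir'
            rwa [show ir' = (i, ir'.2) from by rw [← hfst]] at hmf
          have := pv_key_unique pending hnd i ir'.2 r hmem' hir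
          rw [this, hc] at hnc; cases hnc
        rw [ihB i hnotin]
        rw [pvClaimF]
        rw [hFpos i r hir hc]
        simp [pvResOf, hres]
      · -- not claimed: stays pending; A's scan also passes over this interval
        have hir' : (i, r) ∈ pending' := List.mem_filter.2 ⟨hir, by simp [hc]⟩
        rw [ihA i r hir', pvClaimF, hFneg i ?hne]
        case hne =>
          rintro ⟨rr, hrr, hcrr⟩
          rw [pv_key_unique pending hnd i rr r hrr hir] at hcrr
          exact hc hcrr
        have hskip : in_range r ((lo :: hi :: u) :: rest) = in_range r rest := by
          rcases hwf (i, r) hir with h2 | ⟨h1, hlt⟩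
          · obtain ⟨a, b, t, rfl⟩ : ∃ a b t, r = a :: b :: t := by
              match r, h2 with
              | a :: b :: t, _ => exact ⟨a, b, t, rfl⟩
            have ha : PySem.List.pyGet? (a :: b :: t) (0 : Int) = some a := by simp [pysem]
            have hb : PySem.List.pyGet? (a :: b :: t) (1 : Int) = some b := by simp [pysem]
            have hcv : ¬ (lo ≤ a ∧ b ≤ hi) := by
              intro hcv
              exact hc (by unfold pvContains; rw [ha, hb]; simp [hcv.1, hcv.2])
            rw [in_range, ha, g0]
            dsimp only
            by_cases hla : a ≥ lo
            · rw [if_pos hla, hb, g1]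
              dsimp only
              rw [if_neg (by omega : ¬ b ≤ hi)]
            · rw [if_neg hla]
          · obtain ⟨a, rfl⟩ : ∃ a, r = [a] := by
              match r, h1 with
              | [a], _ => exact ⟨a, rfl⟩
            have ha : a < lo := by
              simpa using hlt (lo :: hi :: u) (List.mem_cons_self ..)
            have h0 : PySem.List.pyGet? [a] (0 : Int) = some a := by simp [pysem]
            rw [in_range, h0, g0]
            dsimp only
            rw [if_neg (by omega : ¬ a ≥ lo)]
        rw [hskip]
    · intro i hni
      have hni' : i ∉ pending'.map Prod.fst := by
        intro hmem
        obtain ⟨ir', hir', hfst⟩ := List.mem_map.1 hmem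
        exact hni (hfst ▸ List.mem_map_of_mem (List.mem_of_mem_filter hir'))
      rw [ihB i hni', pvClaimF, hFneg i ?_]
      rintro ⟨rr, hrr, _⟩
      exact hni (List.mem_map_of_mem (f := Prod.fst) hrr)

-- the characterization of B's match table starting from the empty dictionary
theorem pv_fill_get? (plus : Bool) (phase : Int) (ivs : List (List Int))
    (hivs : ∀ iv ∈ ivs, 2 ≤ iv.length) (items : List (Int × List Int))
    (hnd : (items.map Prod.fst).Nodup) (hwf : ∀ ir ∈ items, pvRowWf ivs ir.2)
    (i : Int) (r : List Int) (hir : (i, r) ∈ items) :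
    (pvFill plus phase ivs items).get? i = (in_range r ivs).map (pvResOf plus phase) := by
  have h := (pv_fill_go plus phase ivs hivs PySem.Dict.empty items hnd hwf).1 i r hir
  rw [pvFill, h, PySem.Dict.get?_empty]
  rcases in_range r ivs with _ | civ <;> rfl

-- ===== VERDICT (by name: the statement is the Claim_ definition above) =====
theorem rm_rest_incomplete_codons_spec : Claim_equal_rm_rest_incomplete_codons := by
  intro avail merged strand _hDom hPre
  obtain ⟨hM, hD⟩ := hPre
  unfold Spec_rm_rest_incomplete_codons rm_rest_incomplete_codons rm_rest_incomplete_codons_alt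
  dsimp only
  have hnd := PySem.Dict.nodup_keys_ofList (κ := Int) (ν := List (List Int)) merged
  rw [PySem.Dict.items_eq_map_keys _ hnd ([] : List (List Int)), List.map_map]
  have hitems : (PySem.List.enumerate avail 0).map Prod.snd = avail :=
    PySem.List.map_snd_enumerate ..
  have hndit : ((PySem.List.enumerate avail 0).map Prod.fst).Nodup := by
    have hp := PySem.List.pairwise_lt_enumerate avail (0 : Int)
    exact (List.pairwise_map.2 hp).imp (fun h => ne_of_lt h)
  conv_lhs => rw [← hitems]
  rw [List.foldl_map]
  apply List.foldl_ext
  intro acc ir hir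
  rcases ir with ⟨i, r⟩
  have hrmem : r ∈ avail := by
    have := List.mem_map_of_mem (f := Prod.snd) hir
    rwa [hitems] at this
  rw [List.foldl_map]
  apply List.foldl_ext
  intro acc2 phase hphase
  dsimp only [Function.comp]
  obtain ⟨ivs, hget⟩ : ∃ v, (PySem.Dict.ofList merged).get? phase = some v := by
    rcases h' : (PySem.Dict.ofList merged).get? phase with _ | v
    · exact absurd hphase ((PySem.Dict.get?_eq_none_iff_not_mem_keys _ _).1 h')
    · exact ⟨v, rfl⟩
  rw [PySem.Dict.getD_of_get?_eq_some _ _ hget]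
  have hmem : ivs ∈ (PySem.Dict.ofList merged).values := by
    have := PySem.Dict.mem_items_of_get?_eq_some _ hget
    have h3 := List.mem_map_of_mem (f := Prod.snd) this
    simpa [PySem.Dict.values] using h3
  rcases hD with hD | hA
  · -- every phase interval list is empty: both steps keep the accumulator
    rw [hD ivs hmem]
    have hempty : pvFill (strand == "+") phase [] (PySem.List.enumerate avail 0)
        = PySem.Dict.empty := rfl
    rw [hempty, PySem.Dict.get?_empty]
    rfl
  have hwfit : ∀ ir' ∈ PySem.List.enumerate avail (0 : Int), pvRowWf ivs ir'.2 := by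
    intro ir' hir'
    have hr' : ir'.2 ∈ avail := by
      have := List.mem_map_of_mem (f := Prod.snd) hir'
      rwa [hitems] at this
    rcases hA ir'.2 hr' with h2 | ⟨h1, hlt⟩
    · exact Or.inl h2
    · exact Or.inr ⟨h1, hlt ivs hmem⟩
  have hivlen : ∀ iv ∈ ivs, 2 ≤ iv.length := hM ivs hmem
  rw [pv_fill_get? (strand == "+") phase ivs hivlen _ hndit hwfit i r hir]
  rcases hinr : in_range r ivs with _ | civ
  · rfl
  · obtain ⟨lo, hi, w, rfl⟩ : ∃ lo hi w, civ = lo :: hi :: w := by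
      have h2 := hivlen civ (pv_in_range_mem _ _ _ hinr)
      match civ, h2 with
      | lo :: hi :: w, _ => exact ⟨lo, hi, w, rfl⟩
    -- r must have length ≥ 2: a skipped length-1 row is never matched
    obtain ⟨a, b, t, rfl⟩ : ∃ a b t, r = a :: b :: t := by
      rcases hA r hrmem with h2 | ⟨h1, hlt⟩
      · match r, h2 with
        | a :: b :: t, _ => exact ⟨a, b, t, rfl⟩
      · obtain ⟨a, rfl⟩ : ∃ a, r = [a] := by
          match r, h1 with
          | [a], _ => exact ⟨a, rfl⟩
        rw [pv_in_range_len1 a ivs hivlen (hlt ivs hmem)] at hinr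
        cases hinr
    have h0 : PySem.List.pyGet? (a :: b :: t) (0 : Int) = some a := by simp [pysem]
    have h1 : PySem.List.pyGet? (a :: b :: t) (1 : Int) = some b := by simp [pysem]
    have q0 : PySem.List.pyGet? (lo :: hi :: w) (0 : Int) = some lo := by simp [pysem]
    have q1 : PySem.List.pyGet? (lo :: hi :: w) (1 : Int) = some hi := by simp [pysem]
    rw [Option.map_some]
    dsimp only
    rw [cut_incomplete_codon]
    simp only [pvResOf, pvResidue, List.headI, List.tail_cons]
    rw [h0, h1]
    have hm3 : (0 : Int) < 3 := by norm_num
    by_cases hs : strand == "+"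
    · simp only [hs, if_true]
      simp only [PySem.Int.mod_eq_emod_of_pos hm3, PySem.Int.floordiv_eq_ediv_of_pos hm3]
      have e1 : a + ((phase + lo) % 3 - a) % 3 = a + (phase + lo - a) % 3 := by omega
      rw [e1]
      by_cases hgt : a + (phase + lo - a) % 3 < b - (b - (a + (phase + lo - a) % 3)) % 3
      · have hn : (b - (a + (phase + lo - a) % 3)) / 3 > 0 := by omega
        have he : b - ((b - (a + (phase + lo - a) % 3)) % 3)
            = a + (phase + lo - a) % 3 + 3 * ((b - (a + (phase + lo - a) % 3)) / 3) := by omega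
        simp [hn, List.isEmpty, he]
      · have hn : ¬ ((b - (a + (phase + lo - a) % 3)) / 3 > 0) := by omega
        simp [hgt, hn, List.isEmpty]
    · rw [Bool.not_eq_true] at hs
      simp only [hs, Bool.false_eq_true, if_false]
      simp only [PySem.Int.mod_eq_emod_of_pos hm3, PySem.Int.floordiv_eq_ediv_of_pos hm3]
      have e1 : b - (b + (phase + -hi) % 3) % 3 = b - (phase + b - hi) % 3 := by omega
      rw [e1]
      by_cases hgt : a + (b - (phase + b - hi) % 3 - a) % 3 < b - (phase + b - hi) % 3
      · have hn : (b - (phase + b - hi) % 3 - a) / 3 > 0 := by omega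
        have he : b - (phase + b - hi) % 3 - 3 * ((b - (phase + b - hi) % 3 - a) / 3)
            = a + (b - (phase + b - hi) % 3 - a) % 3 := by omega
        simp [hgt, hn, List.isEmpty, he]
      · have hn : ¬ ((b - (phase + b - hi) % 3 - a) / 3 > 0) := by omega
        simp [hgt, hn, List.isEmpty]
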